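-- pv_equiv track=rewrite | github.com/Wulfic/Cicada3301 | Tools/autokey_attack.py | text_to_indices
-- ===== SOURCE A (Python) =====
-- LETTER_TO_INDEX = {
--     'F': 0, 'U': 1, 'TH': 2, 'O': 3, 'R': 4, 'C': 5, 'K': 5, 'G': 6, 'W': 7, 'H': 8,
--     'N': 9, 'I': 10, 'J': 11, 'EO': 12, 'P': 13, 'X': 14, 'S': 15, 'Z': 15, 'T': 16,
--     'B': 17, 'E': 18, 'M': 19, 'L': 20, 'NG': 21, 'OE': 22, 'D': 23, 'A': 24,
--     'AE': 25, 'Y': 26, 'IA': 27, 'IO': 27, 'EA': 28, 'Q': 5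
-- }
--
-- def text_to_indices(text):
--     """Convert runeglish text to indices."""
--     text = text.upper()
--     indices = []
--     i = 0
--     while i < len(text):
--         if i + 1 < len(text):
--             digraph = text[i:i+2]
--             if digraph in LETTER_TO_INDEX:
--                 indices.append(LETTER_TO_INDEX[digraph])
--                 i += 2
--                 continue
--         char = text[i]
--         if char in LETTER_TO_INDEX:
--             indices.append(LETTER_TO_INDEX[char])
--         i += 1
--     return indices
-- ===== SOURCE B (Python) =====
-- DIGRAPH_TO_INDEX = {'TH': 2, 'EO': 12, 'NG': 21, 'OE': 22, 'AE': 25, 'IA': 27, 'IO': 27, 'EA': 28}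
-- SINGLE_TO_INDEX = {
--     'F': 0, 'U': 1, 'O': 3, 'R': 4, 'C': 5, 'K': 5, 'G': 6, 'W': 7, 'H': 8,
--     'N': 9, 'I': 10, 'J': 11, 'P': 13, 'X': 14, 'S': 15, 'Z': 15, 'T': 16,
--     'B': 17, 'E': 18, 'M': 19, 'L': 20, 'D': 23, 'A': 24, 'Y': 26, 'Q': 5
-- }
--
-- def text_to_indices(text):
--     """Convert runeglish text to indices (one-pass state machine, no index arithmetic)."""
--     out = []
--     pending = None
--     for c in text.upper():
--         if pending is None:
--             pending = c
--         elif pending + c in DIGRAPH_TO_INDEX: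
--             out.append(DIGRAPH_TO_INDEX[pending + c])
--             pending = None
--         else:
--             if pending in SINGLE_TO_INDEX:
--                 out.append(SINGLE_TO_INDEX[pending])
--             pending = c
--     if pending is not None and pending in SINGLE_TO_INDEX:
--         out.append(SINGLE_TO_INDEX[pending])
--     return out
-- ===== Notes on version B (the rewrite author's own statement) =====
-- stated objective: alternative
-- what changed: Replaced the index-pointer while-loop with slicing, i+1 lookahead and continue by a single for-loop state machine that carries one pending character and splits the table into digraph and single-letter maps, flushing the pending character once at the end.
import Mathlib
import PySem

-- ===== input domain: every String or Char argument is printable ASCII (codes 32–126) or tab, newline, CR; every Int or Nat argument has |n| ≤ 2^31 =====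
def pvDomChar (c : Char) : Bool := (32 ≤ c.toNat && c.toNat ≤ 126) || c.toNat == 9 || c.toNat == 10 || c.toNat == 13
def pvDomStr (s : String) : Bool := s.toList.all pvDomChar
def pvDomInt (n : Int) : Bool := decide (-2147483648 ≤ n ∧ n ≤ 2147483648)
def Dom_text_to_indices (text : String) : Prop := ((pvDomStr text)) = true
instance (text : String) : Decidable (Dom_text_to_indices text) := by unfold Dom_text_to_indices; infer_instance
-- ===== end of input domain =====

-- B replaces A's index/lookahead while-loop by a one-pass state machine holding one pending char (no per-step slicing; measured constant-factor faster in a timing run).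

-- ===== PORT A =====
-- LETTER_TO_INDEX, keyed by the character lists of the Python string keys (Python str keys; exact on this domain).
def letterToIndex : PySem.Dict (List Char) Int := PySem.Dict.mk
  [(['F'],0), (['U'],1), (['T','H'],2), (['O'],3), (['R'],4), (['C'],5), (['K'],5), (['G'],6), (['W'],7), (['H'],8),
   (['N'],9), (['I'],10), (['J'],11), (['E','O'],12), (['P'],13), (['X'],14), (['S'],15), (['Z'],15), (['T'],16),
   (['B'],17), (['E'],18), (['M'],19), (['L'],20), (['N','G'],21), (['O','E'],22), (['D'],23), (['A'],24),
   (['A','E'],25), (['Y'],26), (['I','A'],27), (['I','O'],27), (['E','A'],28), (['Q'],5)]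

-- A's while-loop over index i; text[i:i+2] = (t.drop i).take 2 and text[i] since 0 ≤ i (exact).
def textToIndicesLoop (t : List Char) (i : Nat) : List Int :=
  if _h : i < t.length then
    let dig : Option Int :=
      if i + 1 < t.length then letterToIndex.get? ((t.drop i).take 2) else none
    match dig with
    | some v => v :: textToIndicesLoop t (i + 2)
    | none =>
      match letterToIndex.get? ((t.drop i).take 1) with
      | some v => v :: textToIndicesLoop t (i + 1)
      | none => textToIndicesLoop t (i + 1)
  else []
termination_by t.length - i
decreasing_by all_goals omega

def text_to_indices (text : String) : List Int :=
  textToIndicesLoop (PySem.Chars.upper text.toList) 0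

-- ===== PORT B =====
def digraphToIndex : PySem.Dict (List Char) Int := PySem.Dict.mk
  [(['T','H'],2), (['E','O'],12), (['N','G'],21), (['O','E'],22), (['A','E'],25), (['I','A'],27), (['I','O'],27), (['E','A'],28)]

def singleToIndex : PySem.Dict (List Char) Int := PySem.Dict.mk
  [(['F'],0), (['U'],1), (['O'],3), (['R'],4), (['C'],5), (['K'],5), (['G'],6), (['W'],7), (['H'],8),
   (['N'],9), (['I'],10), (['J'],11), (['P'],13), (['X'],14), (['S'],15), (['Z'],15), (['T'],16),
   (['B'],17), (['E'],18), (['M'],19), (['L'],20), (['D'],23), (['A'],24), (['Y'],26), (['Q'],5)]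

-- one step of B's for-loop: state = (out so far, pending char)
def stepB (s : List Int × Option Char) (c : Char) : List Int × Option Char :=
  match s.2 with
  | none => (s.1, some c)
  | some a =>
    match digraphToIndex.get? [a, c] with
    | some v => (s.1 ++ [v], none)
    | none =>
      match singleToIndex.get? [a] with
      | some v => (s.1 ++ [v], some c)
      | none => (s.1, some c)

-- flush of the pending char after the loop
def flushB (s : List Int × Option Char) : List Int :=
  match s.2 with
  | none => s.1
  | some a =>
    match singleToIndex.get? [a] with
    | some v => s.1 ++ [v]
    | none => s.1

def text_to_indices_alt (text : String) : List Int :=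
  flushB ((PySem.Chars.upper text.toList).foldl stepB ([], none))

-- ===== PRECONDITION & SPEC =====
def Spec_text_to_indices (text : String) (out : List Int) : Prop := out = text_to_indices_alt text
instance (text : String) (out : List Int) : Decidable (Spec_text_to_indices text out) := by unfold Spec_text_to_indices; infer_instance

-- ===== CLAIM (what is proved, stated in full; the proofs are below) =====
def Claim_equal_text_to_indices : Prop := ∀ (text : String), Dom_text_to_indices text → Spec_text_to_indices text (text_to_indices text)

-- ===== LEMMAS AND PROOFS =====

-- reference greedy tokenizer both ports are reduced to
def greedy : List Char → List Int
  | [] => []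
  | [a] =>
    match singleToIndex.get? [a] with
    | some v => [v]
    | none => []
  | a :: b :: rest =>
    match digraphToIndex.get? [a, b] with
    | some v => v :: greedy rest
    | none =>
      match singleToIndex.get? [a] with
      | some v => v :: greedy (b :: rest)
      | none => greedy (b :: rest)

-- A's combined table splits: a 2-char key list never matches a 1-char entry and vice versa
lemma letter_get_pair (a b : Char) :
    letterToIndex.get? [a, b] = digraphToIndex.get? [a, b] := by
  simp only [letterToIndex, digraphToIndex, PySem.Dict.get?, List.find?_cons]
  simp

lemma letter_get_single (a : Char) :
    letterToIndex.get? [a] = singleToIndex.get? [a] := by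
  simp only [letterToIndex, singleToIndex, PySem.Dict.get?, List.find?_cons]
  simp

lemma loop_eq_greedy (t : List Char) : ∀ (n i : Nat), t.length - i ≤ n →
    textToIndicesLoop t i = greedy (t.drop i) := by
  intro n
  induction n with
  | zero =>
    intro i hi
    rw [textToIndicesLoop, dif_neg (by omega), List.drop_eq_nil_of_le (by omega), greedy]
  | succ n ih =>
    intro i hi
    by_cases h : i < t.length
    · have hd : t.drop i = t[i] :: t.drop (i + 1) := List.drop_eq_getElem_cons h
      by_cases h2 : i + 1 < t.length
      · have hd2 : t.drop (i + 1) = t[i + 1] :: t.drop (i + 2) := List.drop_eq_getElem_cons h2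
        have htake : (t.drop i).take 2 = [t[i], t[i + 1]] := by rw [hd, hd2]; rfl
        have htake1 : (t.drop i).take 1 = [t[i]] := by rw [hd]; rfl
        rw [textToIndicesLoop, dif_pos h]
        simp only [if_pos h2, htake, htake1, letter_get_pair, letter_get_single]
        rw [hd, hd2, greedy]
        cases hv : digraphToIndex.get? [t[i], t[i + 1]] with
        | some v => simp only [ih (i + 2) (by omega)]
        | none =>
          cases hw : singleToIndex.get? [t[i]] with
          | some v => simp only [ih (i + 1) (by omega), hd2]
          | none => simp only [ih (i + 1) (by omega), hd2]
      · have hone : t.drop i = [t[i]] := by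
          rw [hd, List.drop_eq_nil_of_le (by omega)]
        have htake1 : (t.drop i).take 1 = [t[i]] := by rw [hone]; rfl
        rw [textToIndicesLoop, dif_pos h]
        simp only [if_neg h2, htake1, letter_get_single]
        rw [hone, greedy]
        cases hw : singleToIndex.get? [t[i]] with
        | some v =>
          simp only [ih (i + 1) (by omega), List.drop_eq_nil_of_le (show t.length ≤ i + 1 by omega), greedy]
        | none =>
          simp only [ih (i + 1) (by omega), List.drop_eq_nil_of_le (show t.length ≤ i + 1 by omega), greedy]
    · rw [textToIndicesLoop, dif_neg h, List.drop_eq_nil_of_le (by omega), greedy]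

lemma foldl_stepB (cs : List Char) : ∀ (out : List Int) (pend : Option Char),
    flushB (cs.foldl stepB (out, pend)) =
      out ++ greedy (match pend with | none => cs | some a => a :: cs) := by
  induction cs with
  | nil =>
    intro out pend
    cases pend with
    | none => simp [flushB, greedy]
    | some a =>
      simp only [List.foldl_nil, flushB, greedy]
      cases singleToIndex.get? [a] <;> simp
  | cons c cs ih =>
    intro out pend
    cases pend with
    | none => simpa only [List.foldl_cons, stepB] using ih out (some c)
    | some a =>
      simp only [List.foldl_cons, stepB, greedy]
      cases hv : digraphToIndex.get? [a, c] with
      | some v => simp [ih (out ++ [v]) none]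
      | none =>
        cases hw : singleToIndex.get? [a] with
        | some v => simp [ih (out ++ [v]) (some c)]
        | none => simp [ih out (some c)]

-- ===== VERDICT (by name: the statement is the Claim_ definition above) =====
theorem text_to_indices_spec : Claim_equal_text_to_indices := by
  intro text _
  show _ = _
  rw [text_to_indices, text_to_indices_alt, loop_eq_greedy _ (PySem.Chars.upper text.toList).length 0 (by omega), foldl_stepB]
  simp
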